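-- pv_equiv track=rewrite | github.com/amirshnll/Persian-Visual-Question-Answering | src/preprocessing/questions.py | get_tokens_length_frequency
-- ===== SOURCE A (Python) =====
-- def get_tokens_length_frequency(data):
--     temp = {}
--
--     for i in range(len(data)):
--         ql = len(data[i]['tokens'])
--         if ql not in temp:
--             temp[ql] = 1
--         else:
--             temp[ql] += 1
--
--     temp = sorted(temp.items(), key=lambda x: x[0])
--     return {x[0]: x[1] for x in temp}
-- ===== SOURCE B (Python) =====
-- def get_tokens_length_frequency(data):
--     lengths = sorted(len(d['tokens']) for d in data)
--     out = {}
--     i, n = 0, len(lengths)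
--     while i < n:
--         j = i + 1
--         while j < n and lengths[j] == lengths[i]:
--             j += 1
--         out[lengths[i]] = j - i
--         i = j
--     return out
-- ===== Notes on version B (the rewrite author's own statement) =====
-- stated objective: alternative
-- what changed: Replaces hash-counting followed by sorting the distinct keys with sorting all token lengths up front and emitting (length, run-length) pairs in one grouped scan; keys come out ascending automatically.
import Mathlib
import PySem

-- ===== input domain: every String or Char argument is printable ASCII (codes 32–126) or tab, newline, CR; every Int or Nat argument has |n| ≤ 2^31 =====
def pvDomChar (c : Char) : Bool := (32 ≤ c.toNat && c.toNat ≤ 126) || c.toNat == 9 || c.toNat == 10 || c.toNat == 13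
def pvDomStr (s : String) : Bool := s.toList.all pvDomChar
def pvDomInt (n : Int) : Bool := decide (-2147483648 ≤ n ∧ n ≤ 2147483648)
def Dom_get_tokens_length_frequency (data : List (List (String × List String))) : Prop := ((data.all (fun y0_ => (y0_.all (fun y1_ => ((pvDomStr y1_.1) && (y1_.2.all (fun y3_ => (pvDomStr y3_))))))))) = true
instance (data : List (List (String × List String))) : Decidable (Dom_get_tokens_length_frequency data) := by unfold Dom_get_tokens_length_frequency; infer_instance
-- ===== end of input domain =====

-- B replaces hash-counting-then-sort-keys by sort-all-lengths-then-one-grouped-scan; equal return values are proved below.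


-- ===== PORT A =====
-- data[i]['tokens'] : dict access; KeyError excluded by Pre_, so getD with a dummy default is exact there
def get_tokens_length_frequency (data : List (List (String × List String))) : List (Int × Int) :=
  let temp : PySem.Dict Int Int :=
    (PySem.List.pyRange 0 (PySem.List.len data)).foldl (fun temp i =>
      let ql : Int := ((PySem.Dict.mk (PySem.List.pyGetD data i [])).getD "tokens" []).length
      if temp.contains ql = false then temp.insert ql 1
      else temp.modify ql 0 (· + 1)) PySem.Dict.empty
  let sortedItems := PySem.List.sorted temp.items (fun x => x.1)
  (sortedItems.foldl (fun (d : PySem.Dict Int Int) x => d.insert x.1 x.2) PySem.Dict.empty).items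

-- ===== PORT B =====
-- the two nested while loops of Source B: the outer loop emits one (value, run length) pair per run of equal
-- values (the inner 'while lengths[j] == lengths[i]' is the takeWhile, advancing i to j is the dropWhile)
def pvRuns : List Int → List (Int × Int)
  | [] => []
  | x :: xs =>
    (x, 1 + ((xs.takeWhile (· == x)).length : Int)) :: pvRuns (xs.dropWhile (· == x))
termination_by l => l.length
decreasing_by
  simp only [List.length_cons]
  exact Nat.lt_succ_of_le (List.Sublist.length_le (List.dropWhile_sublist _))

def get_tokens_length_frequency_alt (data : List (List (String × List String))) : List (Int × Int) :=
  let lengths := PySem.List.sorted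
    (data.map (fun d => (((PySem.Dict.mk d).getD "tokens" []).length : Int))) (fun x => x)
  pvRuns lengths

-- ===== PRECONDITION & SPEC =====
-- Pre_ excludes exactly the inputs where some element lacks the key 'tokens', on which A raises KeyError.
def Pre_get_tokens_length_frequency (data : List (List (String × List String))) : Prop :=
  ∀ el ∈ data, (PySem.Dict.mk el).contains "tokens" = true
instance (data : List (List (String × List String))) : Decidable (Pre_get_tokens_length_frequency data) := by unfold Pre_get_tokens_length_frequency; infer_instance
def pvWitness_get_tokens_length_frequency : (List (List (String × List String))) :=
  [[("tokens", ["ab", "c"])], [("tokens", [])], [("q", ["z"]), ("tokens", ["x", "y"])]]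

def Spec_get_tokens_length_frequency (data : List (List (String × List String))) (out : List (Int × Int)) : Prop := out = get_tokens_length_frequency_alt data
instance (data : List (List (String × List String))) (out : List (Int × Int)) : Decidable (Spec_get_tokens_length_frequency data out) := by unfold Spec_get_tokens_length_frequency; infer_instance

-- ===== CLAIM (what is proved, stated in full; the proofs are below) =====
def Claim_equal_get_tokens_length_frequency : Prop := ∀ (data : List (List (String × List String))), Dom_get_tokens_length_frequency data → Pre_get_tokens_length_frequency data → Spec_get_tokens_length_frequency data (get_tokens_length_frequency data)

-- ===== LEMMAS AND PROOFS =====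

-- the token-length of one element
def pvKey (d : List (String × List String)) : Int :=
  (((PySem.Dict.mk d).getD "tokens" []).length : Int)

-- A's loop body is the Counter step (on an absent key both append (key, 1))
lemma pvStepEq :
    (fun (temp : PySem.Dict Int Int) (ql : Int) =>
      if temp.contains ql = false then temp.insert ql 1
      else temp.modify ql 0 (· + 1)) =
    (fun (d : PySem.Dict Int Int) (x : Int) => d.modify x 0 (· + 1)) := by
  funext d x
  by_cases h : d.contains x
  · simp [h]
  · simp only [Bool.not_eq_true] at h
    simp [h, PySem.Dict.modify, PySem.Dict.getD_of_not_contains (h := h)]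

-- set(xs) (first occurrences in order) is a sublist of xs
lemma pvOfListSublist {α : Type} [BEq α] [LawfulBEq α] (s : List α) :
    (PySem.Set.ofList s).Sublist s := by
  induction s with
  | nil => simp [PySem.Set.ofList_nil]
  | cons x xs ih =>
    rw [PySem.Set.ofList_cons]
    exact List.Sublist.cons₂ x (List.Sublist.trans (List.filter_sublist) ih)

-- discarding x from set(prefix-of-x's ++ r) discards the prefix entirely
lemma pvDiscardPrefix (x : Int) (r : List Int) :
    ∀ t : List Int, (∀ y ∈ t, y = x) →
      (PySem.Set.ofList (t ++ r)).discard x = (PySem.Set.ofList r).discard x := by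
  intro t
  induction t with
  | nil => intro _; rfl
  | cons a t' ih =>
    intro h
    have ha : a = x := h a (List.mem_cons_self ..)
    subst ha
    rw [List.cons_append, PySem.Set.ofList_cons]
    have := ih (fun y hy => h y (List.mem_cons_of_mem _ hy))
    simp only [PySem.Set.discard, List.filter_cons] at *
    simp [List.filter_filter, this]

-- the grouped scan on a ≤-sorted list yields each distinct value with its multiplicity
lemma pvRunsEq (s : List Int) (hs : s.Pairwise (· ≤ ·)) :
    pvRuns s = (PySem.Set.ofList s).map (fun k => (k, (s.count k : Int))) := by
  induction s using pvRuns.induct with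
  | case1 => simp [pvRuns, PySem.Set.ofList_nil]
  | case2 x xs ih =>
    have hpw : xs.Pairwise (· ≤ ·) := (List.pairwise_cons.mp hs).2
    have hle : ∀ y ∈ xs, x ≤ y := (List.pairwise_cons.mp hs).1
    set t := xs.takeWhile (· == x) with ht
    set r := xs.dropWhile (· == x) with hr
    have htx : ∀ y ∈ t, y = x := fun y hy => by
      have := List.mem_takeWhile_imp hy; simpa using this
    have htr : t ++ r = xs := List.takeWhile_append_dropWhile
    have hrs : r.Pairwise (· ≤ ·) := List.Pairwise.sublist (List.dropWhile_sublist _) hpw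
    have hxr : x ∉ r := by
      intro hx
      cases hhd : r with
      | nil => simp [hhd] at hx
      | cons y r' =>
        have hy : ¬ (y == x) = true := by
          have := List.head?_dropWhile_not (· == x) xs
          rw [← hr, hhd] at this; simpa using this
        have hyx : y ≠ x := by simpa using hy
        rw [hhd] at hx
        rcases List.mem_cons.mp hx with h1 | h2
        · exact hyx h1.symm
        · have h3 : y ≤ x := by
            rw [hhd] at hrs
            exact (List.pairwise_cons.mp hrs).1 x h2
          have h4 : x ≤ y := hle y ((List.dropWhile_sublist _).mem (by rw [← hr, hhd]; exact List.mem_cons_self ..))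
          exact hyx (le_antisymm h3 h4)
    have hIH : pvRuns r = (PySem.Set.ofList r).map (fun k => (k, (r.count k : Int))) := ih hrs
    have hset : PySem.Set.ofList (x :: xs) = x :: PySem.Set.ofList r := by
      rw [PySem.Set.ofList_cons, ← htr, pvDiscardPrefix x r t htx]
      congr 1
      simp only [PySem.Set.discard]
      exact List.filter_eq_self.mpr (fun y hy => by
        simp only [Bool.not_eq_eq_eq_not, Bool.not_true, beq_eq_false_iff_ne, ne_eq]
        rintro rfl; exact hxr ((PySem.Set.mem_ofList r y).mp hy))
    have hcx : (x :: xs).count x = t.length + 1 := by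
      rw [List.count_cons_self, ← htr, List.count_append]
      rw [List.count_eq_length.mpr (fun b hb => (htx b hb).symm),
          List.count_eq_zero.mpr hxr]
    have hck : ∀ k ∈ PySem.Set.ofList r, (x :: xs).count k = r.count k := by
      intro k hk
      have hkr : k ∈ r := (PySem.Set.mem_ofList r k).mp hk
      have hkx : k ≠ x := fun h => hxr (h ▸ hkr)
      rw [List.count_cons_of_ne hkx.symm, ← htr, List.count_append,
          List.count_eq_zero.mpr (fun hkt => hkx (htx k hkt)), Nat.zero_add]
    rw [pvRuns, hset, List.map_cons, hIH, ← ht]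
    congr 1
    · rw [hcx]; push_cast; ring_nf
    · exact (List.map_congr_left (fun k hk => by rw [hck k hk])).symm

-- A's value, in closed form: ascending distinct lengths paired with their multiplicities
theorem pv_A (data : List (List (String × List String))) :
    get_tokens_length_frequency data =
      (PySem.List.sorted (PySem.Set.ofList (data.map pvKey)) (fun k => k)).map
        (fun k => (k, ((data.map pvKey).count k : Int))) := by
  unfold get_tokens_length_frequency
  show (List.foldl (fun (d : PySem.Dict Int Int) x => d.insert x.1 x.2) PySem.Dict.empty
      (PySem.List.sorted
        (List.foldl (fun (temp : PySem.Dict Int Int) i =>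
          if temp.contains (pvKey (PySem.List.pyGetD data i [])) = false
          then temp.insert (pvKey (PySem.List.pyGetD data i [])) 1
          else temp.modify (pvKey (PySem.List.pyGetD data i [])) 0 (· + 1))
          PySem.Dict.empty (PySem.List.pyRange 0 (PySem.List.len data))).items
        (fun x => x.1))).items = _
  have h0 : List.foldl (fun (temp : PySem.Dict Int Int) i =>
        if temp.contains (pvKey (PySem.List.pyGetD data i [])) = false
        then temp.insert (pvKey (PySem.List.pyGetD data i [])) 1
        else temp.modify (pvKey (PySem.List.pyGetD data i [])) 0 (· + 1))
        PySem.Dict.empty (PySem.List.pyRange 0 (PySem.List.len data))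
      = PySem.Dict.counter (data.map pvKey) := by
    have := PySem.List.foldl_pyRange_pyGetD data ([] : List (String × List String))
      (fun (temp : PySem.Dict Int Int) el =>
        if temp.contains (pvKey el) = false then temp.insert (pvKey el) 1
        else temp.modify (pvKey el) 0 (· + 1)) PySem.Dict.empty (le_refl 0)
    simp only [Int.toNat_zero, List.drop_zero] at this
    rw [this, PySem.Dict.counter_eq_foldl,
      @List.foldl_map _ _ _ pvKey (fun (d : PySem.Dict Int Int) x => d.modify x 0 (· + 1)) data PySem.Dict.empty]
    congr 1
    exact funext fun d => funext fun el => congrFun (congrFun pvStepEq d) (pvKey el)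
  rw [h0, PySem.Dict.items_counter]
  have hpl : ((PySem.List.sorted (PySem.Set.ofList (data.map pvKey)) (fun k => k)).map
      (fun k => (k, ((data.map pvKey).count k : Int)))).Pairwise
      (fun a b => a.1 < b.1) :=
    List.Pairwise.map _ (fun a b h => h) (PySem.List.sorted_ofList_pairwise_lt (data.map pvKey))
  have hperm : ((PySem.List.sorted (PySem.Set.ofList (data.map pvKey)) (fun k => k)).map
      (fun k => (k, ((data.map pvKey).count k : Int)))).Perm
      ((PySem.Set.ofList (data.map pvKey)).map (fun k => (k, ((data.map pvKey).count k : Int)))) :=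
    List.Perm.map _ (PySem.List.sorted_perm _ _ _)
  rw [PySem.List.sorted_eq_of_perm_of_pairwise_lt _ _ _ hperm hpl]
  have h3 := PySem.Dict.items_foldl_insert_fresh
      (l := (PySem.List.sorted (PySem.Set.ofList (data.map pvKey)) (fun k => k)).map
        (fun k => (k, ((data.map pvKey).count k : Int))))
      (k := fun x : Int × Int => x.1) (v := fun x : Int × Int => x.2)
      (d := PySem.Dict.empty)
      (fun a _ => PySem.Dict.contains_empty _)
      (by
        rw [List.map_map]
        have hc : ((fun x : Int × Int => x.1) ∘
            (fun k : Int => (k, ((data.map pvKey).count k : Int)))) = id := rfl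
        rw [hc, List.map_id]
        exact (PySem.List.sorted_ofList_pairwise_lt (data.map pvKey)).nodup)
  exact h3.trans (by simp [PySem.Dict.empty, Function.comp_def])

-- B's value is the same closed form
theorem pv_B (data : List (List (String × List String))) :
    get_tokens_length_frequency_alt data =
      (PySem.List.sorted (PySem.Set.ofList (data.map pvKey)) (fun k => k)).map
        (fun k => (k, ((data.map pvKey).count k : Int))) := by
  unfold get_tokens_length_frequency_alt
  show pvRuns (PySem.List.sorted (data.map pvKey) (fun x => x)) = _
  set L := data.map pvKey with hL
  set s := PySem.List.sorted L (fun x => x) with hs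
  rw [pvRunsEq s (by simpa using PySem.List.sorted_pairwise L (fun x => x))]
  have hcnt : ∀ k : Int, s.count k = L.count k :=
    fun k => (PySem.List.sorted_perm L (fun x => x) false).count_eq k
  have hsets : PySem.Set.ofList s = PySem.List.sorted (PySem.Set.ofList L) (fun k => k) := by
    refine (PySem.List.sorted_eq_of_perm_of_pairwise_lt _ _ _ ?_ ?_).symm
    · exact (List.perm_ext_iff_of_nodup (PySem.Set.nodup_ofList s) (PySem.Set.nodup_ofList L)).mpr
        (fun a => by
          rw [PySem.Set.mem_ofList, PySem.Set.mem_ofList, hs, PySem.List.mem_sorted])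
    · have hle : (PySem.Set.ofList s).Pairwise (· ≤ ·) :=
        List.Pairwise.sublist (pvOfListSublist s)
          (by simpa using PySem.List.sorted_pairwise L (fun x => x))
      have hne : (PySem.Set.ofList s).Pairwise (· ≠ ·) := PySem.Set.nodup_ofList s
      exact (hle.and hne).imp (fun h => lt_of_le_of_ne h.1 h.2)
  rw [hsets]
  exact List.map_congr_left (fun k _ => by rw [hcnt k])

-- ===== VERDICT (by name: the statement is the Claim_ definition above) =====
theorem get_tokens_length_frequency_spec : Claim_equal_get_tokens_length_frequency := by
  intro data _ _
  unfold Spec_get_tokens_length_frequency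
  rw [pv_A, pv_B]
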